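-- pv_equiv track=rewrite | github.com/peredz/Komp_graphics | Task5/task_b.py | get_triangles_ear_clipping
-- ===== SOURCE A (Python) =====
-- def is_point_in_triangle(p, a, b, c):
--     """Проверка, лежит ли точка p внутри треугольника abc (барицентрический метод)"""
--
--     def cross_product(p1, p2, p3):
--         return (p1[0] - p3[0]) * (p2[1] - p3[1]) - (p2[0] - p3[0]) * (p1[1] - p3[1])
--
--     d1 = cross_product(p, a, b)
--     d2 = cross_product(p, b, c)
--     d3 = cross_product(p, c, a)
--
--     has_neg = (d1 < 0) or (d2 < 0) or (d3 < 0)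
--     has_pos = (d1 > 0) or (d2 > 0) or (d3 > 0)
--
--     return not (has_neg and has_pos)
--
-- def is_convex(prev, curr, next_p):
--     """Проверка, является ли вершина curr выпуклой"""
--     # Векторное произведение (направление поворота)
--     val = (curr[0] - prev[0]) * (next_p[1] - curr[1]) - (curr[1] - prev[1]) * (next_p[0] - curr[0])
--     return val > 0  # True, если поворот левый (для обхода против часовой)
--
-- def get_triangles_ear_clipping(polygon):
--     """Алгоритм Ear Clipping"""
--     vertices = list(polygon)
--     triangles = []
--
--     # Пока в полигоне больше 3 вершин
--     while len(vertices) > 3: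
--         ear_found = False
--         for i in range(len(vertices)):
--             prev = vertices[i - 1]
--             curr = vertices[i]
--             next_p = vertices[(i + 1) % len(vertices)]
--
--             # 1. Вершина должна быть выпуклой
--             if is_convex(prev, curr, next_p):
--                 # 2. Внутри треугольника не должно быть других вершин
--                 is_ear = True
--                 for j in range(len(vertices)):
--                     p = vertices[j]
--                     if p in (prev, curr, next_p):
--                         continue
--                     if is_point_in_triangle(p, prev, curr, next_p):
--                         is_ear = False
--                         break
--
--                 if is_ear:
--                     # Нашли ухо! Отрезаем.
--                     triangles.append((prev, curr, next_p))
--                     vertices.pop(i)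
--                     ear_found = True
--                     break
--
--         if not ear_found:
--             # Если ухо не найдено (может быть в самопересекающихся полигонах)
--             break
--
--     # Добавляем последний оставшийся треугольник
--     if len(vertices) == 3:
--         triangles.append(tuple(vertices))
--
--     return triangles
-- ===== SOURCE B (Python) =====
-- def get_triangles_ear_clipping(polygon):
--     """Ear clipping, written as a recursion that conses triangles front-to-back."""
--
--     def cross(p, q, r):
--         return (p[0] - r[0]) * (q[1] - r[1]) - (q[0] - r[0]) * (p[1] - r[1])
--
--     def inside(p, a, b, c):
--         ds = (cross(p, a, b), cross(p, b, c), cross(p, c, a))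
--         return all(d >= 0 for d in ds) or all(d <= 0 for d in ds)
--
--     def corners(vs, i):
--         n = len(vs)
--         return vs[(i + n - 1) % n], vs[i], vs[(i + 1) % n]
--
--     def is_ear(vs, i):
--         a, b, c = corners(vs, i)
--         if cross(b, c, a) <= 0:
--             return False
--         return all(not inside(p, a, b, c) for p in vs if p not in (a, b, c))
--
--     def clip(vs):
--         if len(vs) == 3:
--             return [tuple(vs)]
--         if len(vs) < 3:
--             return []
--         i = next((k for k in range(len(vs)) if is_ear(vs, k)), None)
--         if i is None:
--             return []
--         a, b, c = corners(vs, i)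
--         return [(a, b, c)] + clip(vs[:i] + vs[i + 1:])
--
--     return clip(list(polygon))
-- ===== Notes on version B (the rewrite author's own statement) =====
-- stated objective: simpler
-- what changed: Replaces the while-loop with flags, in-place pop and a break-driven inner scan by a plain recursion that conses each clipped triangle onto the result, finds the ear index with a single next() over a generator, and tests point containment by the all-nonneg-or-all-nonpos sign rule instead of the has_neg/has_pos booleans.
import Mathlib
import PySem

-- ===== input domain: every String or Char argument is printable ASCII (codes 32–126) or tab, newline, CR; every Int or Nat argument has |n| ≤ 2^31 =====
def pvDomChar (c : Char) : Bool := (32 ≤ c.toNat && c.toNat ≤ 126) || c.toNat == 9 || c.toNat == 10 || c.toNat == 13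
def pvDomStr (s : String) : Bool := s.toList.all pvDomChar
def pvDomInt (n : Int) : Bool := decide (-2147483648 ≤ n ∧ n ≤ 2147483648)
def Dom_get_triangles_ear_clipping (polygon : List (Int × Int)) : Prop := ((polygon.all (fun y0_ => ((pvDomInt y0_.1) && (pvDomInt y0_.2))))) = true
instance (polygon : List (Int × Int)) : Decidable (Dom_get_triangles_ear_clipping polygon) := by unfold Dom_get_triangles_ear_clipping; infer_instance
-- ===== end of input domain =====

-- B replaces A's while/pop/flag/break control flow by a recursion consing the triangles,
-- an ear search via first-index-satisfying-predicate, and a different (equivalent) sign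
-- rule for point-in-triangle; same cost, simpler shape.

-- ===== PORT A =====
-- cross_product inside is_point_in_triangle
def pvCrossA (p1 p2 p3 : Int × Int) : Int :=
  (p1.1 - p3.1) * (p2.2 - p3.2) - (p2.1 - p3.1) * (p1.2 - p3.2)

def pvIsPointInTriangleA (p a b c : Int × Int) : Bool :=
  let d1 := pvCrossA p a b
  let d2 := pvCrossA p b c
  let d3 := pvCrossA p c a
  let hasNeg := decide (d1 < 0) || decide (d2 < 0) || decide (d3 < 0)
  let hasPos := decide (d1 > 0) || decide (d2 > 0) || decide (d3 > 0)
  !(hasNeg && hasPos)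

def pvIsConvexA (prev curr next_p : Int × Int) : Bool :=
  decide ((curr.1 - prev.1) * (next_p.2 - curr.2) - (curr.2 - prev.2) * (next_p.1 - curr.1) > 0)

-- the inner 'for j in range(len(vertices))' with continue / break
def pvEarInnerA : List (Int × Int) → (Int × Int) → (Int × Int) → (Int × Int) → Bool
  | [], _, _, _ => true
  | p :: rest, a, b, c =>
    if p = a ∨ p = b ∨ p = c then pvEarInnerA rest a b c
    else if pvIsPointInTriangleA p a b c then false
    else pvEarInnerA rest a b c

-- prev = vertices[i-1] (Python negative indexing at i = 0), curr = vertices[i], next_p = vertices[(i+1) % len]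
def pvTriA (vs : List (Int × Int)) (i : Nat) : (Int × Int) × (Int × Int) × (Int × Int) :=
  ((PySem.List.pyGet? vs ((i : Int) - 1)).getD (0, 0),
   (PySem.List.pyGet? vs (i : Int)).getD (0, 0),
   (PySem.List.pyGet? vs (((i + 1) % vs.length : Nat) : Int)).getD (0, 0))

-- the 'for i in range(len(vertices))' scan with its break on the first ear
def pvEarScanA (vs : List (Int × Int)) (i : Nat) :
    Option (Nat × ((Int × Int) × (Int × Int) × (Int × Int))) :=
  if h : i < vs.length then
    if pvIsConvexA (pvTriA vs i).1 (pvTriA vs i).2.1 (pvTriA vs i).2.2 &&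
        pvEarInnerA vs (pvTriA vs i).1 (pvTriA vs i).2.1 (pvTriA vs i).2.2 then
      some (i, pvTriA vs i)
    else pvEarScanA vs (i + 1)
  else none
  termination_by vs.length - i

-- 'if len(vertices) == 3: triangles.append(tuple(vertices))'
def pvFinalizeA (vs : List (Int × Int))
    (acc : List ((Int × Int) × (Int × Int) × (Int × Int))) :
    List ((Int × Int) × (Int × Int) × (Int × Int)) :=
  match vs with
  | [a, b, c] => acc ++ [(a, b, c)]
  | _ => acc

-- the 'while len(vertices) > 3' loop; fuel = current length (each clip removes one vertex)
def pvWhileA : Nat → List (Int × Int) → List ((Int × Int) × (Int × Int) × (Int × Int)) →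
    List ((Int × Int) × (Int × Int) × (Int × Int))
  | 0, vs, acc => pvFinalizeA vs acc
  | f + 1, vs, acc =>
    if vs.length > 3 then
      match pvEarScanA vs 0 with
      | some (i, t) =>
        match PySem.List.pop? vs (i : Int) with   -- vertices.pop(i)
        | some (_, rest) => pvWhileA f rest (acc ++ [t])
        | none => pvFinalizeA vs acc              -- unreachable: i < len
      | none => pvFinalizeA vs acc                -- ear not found: break
    else pvFinalizeA vs acc

def get_triangles_ear_clipping (polygon : List (Int × Int)) :
    List ((Int × Int) × (Int × Int) × (Int × Int)) :=
  pvWhileA polygon.length polygon []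

-- ===== PORT B =====
def pvCrossB (p q r : Int × Int) : Int :=
  (p.1 - r.1) * (q.2 - r.2) - (q.1 - r.1) * (p.2 - r.2)

def pvInsideB (p a b c : Int × Int) : Bool :=
  let ds := [pvCrossB p a b, pvCrossB p b c, pvCrossB p c a]
  ds.all (fun d => decide (d ≥ 0)) || ds.all (fun d => decide (d ≤ 0))

def pvCornersB (vs : List (Int × Int)) (i : Nat) :
    (Int × Int) × (Int × Int) × (Int × Int) :=
  let n := vs.length
  -- vs[(i + n - 1) % n], vs[i], vs[(i + 1) % n]: all indices in [0, n) here
  (vs.getD ((i + n - 1) % n) (0, 0), vs.getD i (0, 0), vs.getD ((i + 1) % n) (0, 0))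

def pvIsEarB (vs : List (Int × Int)) (i : Nat) : Bool :=
  let t := pvCornersB vs i
  if pvCrossB t.2.1 t.2.2 t.1 ≤ 0 then false
  else (vs.filter fun p => ¬(p = t.1 ∨ p = t.2.1 ∨ p = t.2.2)).all
        fun p => !pvInsideB p t.1 t.2.1 t.2.2

def pvClipB (vs : List (Int × Int)) : List ((Int × Int) × (Int × Int) × (Int × Int)) :=
  if vs.length = 3 then [(vs.getD 0 (0, 0), vs.getD 1 (0, 0), vs.getD 2 (0, 0))]
  else if _h2 : vs.length < 3 then []
  else
    match hf : (List.range vs.length).find? (pvIsEarB vs) with   -- next((k …), None)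
    | none => []
    | some i =>
      pvCornersB vs i ::
        pvClipB (PySem.List.slice vs none (some (i : Int)) ++
                 PySem.List.slice vs (some ((i : Int) + 1)) none)   -- vs[:i] + vs[i+1:]
  termination_by vs.length
  decreasing_by
    have hi : i < vs.length := List.mem_range.mp (List.mem_of_find?_eq_some hf)
    have hc : ((i : Int) + 1) = ((i + 1 : Nat) : Int) := by push_cast; ring
    rw [hc, PySem.List.slice_to_natCast, PySem.List.slice_from_natCast]
    rw [List.length_append, List.length_take, List.length_drop]
    omega

def get_triangles_ear_clipping_alt (polygon : List (Int × Int)) :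
    List ((Int × Int) × (Int × Int) × (Int × Int)) :=
  pvClipB polygon

-- ===== PRECONDITION & SPEC =====
def Spec_get_triangles_ear_clipping (polygon : List (Int × Int)) (out : List ((Int × Int) × (Int × Int) × (Int × Int))) : Prop := out = get_triangles_ear_clipping_alt polygon
instance (polygon : List (Int × Int)) (out : List ((Int × Int) × (Int × Int) × (Int × Int))) : Decidable (Spec_get_triangles_ear_clipping polygon out) := by unfold Spec_get_triangles_ear_clipping; infer_instance

-- ===== CLAIM (what is proved, stated in full; the proofs are below) =====
def Claim_equal_get_triangles_ear_clipping : Prop := ∀ (polygon : List (Int × Int)), Dom_get_triangles_ear_clipping polygon → Spec_get_triangles_ear_clipping polygon (get_triangles_ear_clipping polygon)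

-- ===== LEMMAS AND PROOFS =====

-- the two cross-product helpers are the same formula
theorem pvCross_eq : pvCrossB = pvCrossA := rfl

-- A's has_neg/has_pos containment test equals B's all-nonneg-or-all-nonpos test
theorem pvInside_eq (p a b c : Int × Int) :
    pvIsPointInTriangleA p a b c = pvInsideB p a b c := by
  simp only [pvIsPointInTriangleA, pvInsideB, pvCross_eq]
  generalize pvCrossA p a b = d1
  generalize pvCrossA p b c = d2
  generalize pvCrossA p c a = d3
  rw [Bool.eq_iff_iff]
  simp
  omega

-- A's inner continue/break scan equals B's filter + all
theorem pvEarInner_eq (vs : List (Int × Int)) (a b c : Int × Int) :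
    pvEarInnerA vs a b c =
      (vs.filter fun p => ¬(p = a ∨ p = b ∨ p = c)).all (fun p => !pvInsideB p a b c) := by
  induction vs with
  | nil => simp [pvEarInnerA]
  | cons p rest ih =>
    by_cases hm : p = a ∨ p = b ∨ p = c
    · simp [pvEarInnerA, hm, ih]
    · cases hb : pvIsPointInTriangleA p a b c <;>
        simp [pvEarInnerA, hm, ih, ← pvInside_eq, hb]

-- A's Python-indexed (prev, curr, next) triple equals B's mod-indexed one
theorem pvTri_eq (vs : List (Int × Int)) (i : Nat) (hi : i < vs.length) :
    pvTriA vs i = pvCornersB vs i := by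
  have hn : 0 < vs.length := by omega
  unfold pvTriA pvCornersB
  refine congrArg₂ Prod.mk ?_ (congrArg₂ Prod.mk ?_ ?_)
  · rcases Nat.eq_zero_or_pos i with h0 | hpos
    · subst h0
      have h1 : ((0 : Nat) : Int) - 1 = -1 := by norm_num
      have h2 : (0 + vs.length - 1) % vs.length = vs.length - 1 := by
        rw [Nat.zero_add]; exact Nat.mod_eq_of_lt (by omega)
      rw [h1, PySem.List.pyGet?_neg_one, h2, List.getLast?_eq_getElem?,
        List.getD_eq_getElem?_getD]
    · have h1 : ((i : Nat) : Int) - 1 = ((i - 1 : Nat) : Int) := by push_cast [hpos]; ring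
      have h2 : (i + vs.length - 1) % vs.length = i - 1 := by
        have : i + vs.length - 1 = (i - 1) + vs.length := by omega
        rw [this, Nat.add_mod_right]
        exact Nat.mod_eq_of_lt (by omega)
      rw [h1, PySem.List.pyGet?_natCast, h2, List.getD_eq_getElem?_getD]
  · rw [PySem.List.pyGet?_natCast, List.getD_eq_getElem?_getD]
  · rw [PySem.List.pyGet?_natCast, List.getD_eq_getElem?_getD]

-- A's convex-then-inner-scan ear condition at index i equals B's is_ear
theorem pvEarCond_eq (vs : List (Int × Int)) (i : Nat) (hi : i < vs.length) :
    (pvIsConvexA (pvTriA vs i).1 (pvTriA vs i).2.1 (pvTriA vs i).2.2 &&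
       pvEarInnerA vs (pvTriA vs i).1 (pvTriA vs i).2.1 (pvTriA vs i).2.2) = pvIsEarB vs i := by
  rw [pvTri_eq vs i hi]
  unfold pvIsEarB
  generalize pvCornersB vs i = t
  obtain ⟨a, b, c⟩ := t
  have hconv : pvIsConvexA a b c = decide (pvCrossB b c a > 0) := by
    unfold pvIsConvexA pvCrossB
    have : (b.1 - a.1) * (c.2 - b.2) - (b.2 - a.2) * (c.1 - b.1)
         = (b.1 - a.1) * (c.2 - a.2) - (c.1 - a.1) * (b.2 - a.2) := by ring
    rw [this]
  by_cases hle : pvCrossB b c a ≤ 0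
  · simp [hconv, hle, show ¬ pvCrossB b c a > 0 by omega]
  · simp [hconv, hle, show pvCrossB b c a > 0 by omega, pvEarInner_eq]

-- A's linear scan from i equals find? over the remaining index range
theorem pvEarScan_eq (vs : List (Int × Int)) (i : Nat) :
    pvEarScanA vs i =
      ((List.range' i (vs.length - i)).find? (pvIsEarB vs)).map (fun j => (j, pvTriA vs j)) := by
  induction' hn : vs.length - i with k ih generalizing i
  · have hge : ¬ i < vs.length := by omega
    rw [pvEarScanA, dif_neg hge]
    simp
  · have hi : i < vs.length := by omega
    rw [pvEarScanA, dif_pos hi, List.range'_succ, List.find?_cons, pvEarCond_eq vs i hi]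
    cases hE : pvIsEarB vs i
    · simp only [Bool.false_eq_true, if_false]
      exact ih (i + 1) (by omega)
    · simp

theorem pvFinalize_ne (vs : List (Int × Int)) (acc : List ((Int × Int) × (Int × Int) × (Int × Int)))
    (h : vs.length ≠ 3) : pvFinalizeA vs acc = acc := by
  rcases vs with _ | ⟨a, _ | ⟨b, _ | ⟨c, _ | ⟨d, t⟩⟩⟩⟩ <;> simp [pvFinalizeA] at h ⊢

-- unfolding lemmas for pvClipB's recursive case
theorem pvClipB_none (vs : List (Int × Int)) (hgt : vs.length > 3)
    (hfind : (List.range vs.length).find? (pvIsEarB vs) = none) :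
    pvClipB vs = [] := by
  rw [pvClipB, if_neg (by omega), dif_neg (by omega)]
  split
  · rfl
  · rename_i i heq
    rw [heq] at hfind
    exact absurd hfind (by simp)

theorem pvClipB_some (vs : List (Int × Int)) (i : Nat) (hgt : vs.length > 3)
    (hfind : (List.range vs.length).find? (pvIsEarB vs) = some i) :
    pvClipB vs = pvCornersB vs i :: pvClipB (vs.eraseIdx i) := by
  have hi : i < vs.length := List.mem_range.mp (List.mem_of_find?_eq_some hfind)
  rw [pvClipB, if_neg (by omega), dif_neg (by omega)]
  split
  · rename_i heq
    rw [heq] at hfind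
    exact absurd hfind (by simp)
  · rename_i j heq
    rw [heq] at hfind
    obtain rfl : j = i := Option.some.inj hfind
    congr 1
    rw [show ((j : Int) + 1) = ((j + 1 : Nat) : Int) by push_cast; ring,
      PySem.List.slice_to_natCast, PySem.List.slice_from_natCast,
      List.eraseIdx_eq_take_drop_succ]

-- the main loop correspondence: A's while with accumulator = acc ++ B's recursion
theorem pvWhile_eq (fuel : Nat) (vs : List (Int × Int))
    (acc : List ((Int × Int) × (Int × Int) × (Int × Int))) (hf : vs.length = fuel) :
    pvWhileA fuel vs acc = acc ++ pvClipB vs := by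
  induction fuel generalizing vs acc with
  | zero =>
    have : vs = [] := List.length_eq_zero_iff.mp hf
    subst this
    rw [pvClipB]
    simp [pvWhileA, pvFinalizeA]
  | succ f ih =>
    by_cases hgt : vs.length > 3
    · have hrange : List.range vs.length = List.range' 0 (vs.length - 0) := by
        rw [Nat.sub_zero]; exact List.range_eq_range'
      rw [show pvWhileA (f + 1) vs acc =
            (if vs.length > 3 then
              match pvEarScanA vs 0 with
              | some (i, t) =>
                match PySem.List.pop? vs (i : Int) with
                | some (_, rest) => pvWhileA f rest (acc ++ [t])
                | none => pvFinalizeA vs acc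
              | none => pvFinalizeA vs acc
            else pvFinalizeA vs acc) from rfl, if_pos hgt, pvEarScan_eq]
      cases hfind : (List.range' 0 (vs.length - 0)).find? (pvIsEarB vs) with
      | none =>
        rw [pvClipB_none vs hgt (by rw [hrange]; exact hfind)]
        simp [pvFinalize_ne vs acc (by omega)]
      | some i =>
        have hi : i < vs.length := by
          have := List.mem_range'_1.mp (List.mem_of_find?_eq_some hfind)
          omega
        simp only [Option.map_some]
        rw [PySem.List.pop?_natCast vs i hi]
        show pvWhileA f (vs.eraseIdx i) (acc ++ [pvTriA vs i]) = acc ++ pvClipB vs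
        have hlen : (vs.eraseIdx i).length = f := by
          rw [List.length_eraseIdx_of_lt hi]; omega
        rw [ih (vs.eraseIdx i) (acc ++ [pvTriA vs i]) hlen,
          pvClipB_some vs i hgt (by rw [hrange]; exact hfind),
          pvTri_eq vs i hi, List.append_assoc]
        rfl
    · rw [show pvWhileA (f + 1) vs acc =
            (if vs.length > 3 then
              match pvEarScanA vs 0 with
              | some (i, t) =>
                match PySem.List.pop? vs (i : Int) with
                | some (_, rest) => pvWhileA f rest (acc ++ [t])
                | none => pvFinalizeA vs acc
              | none => pvFinalizeA vs acc
            else pvFinalizeA vs acc) from rfl, if_neg hgt]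
      rcases vs with _ | ⟨v1, _ | ⟨v2, _ | ⟨v3, _ | ⟨v4, tl⟩⟩⟩⟩
      · rw [pvClipB]; simp [pvFinalizeA]
      · rw [pvClipB]; simp [pvFinalizeA]
      · rw [pvClipB]; simp [pvFinalizeA]
      · rw [pvClipB]; simp [pvFinalizeA]
      · simp at hgt

-- ===== VERDICT (by name: the statement is the Claim_ definition above) =====
theorem get_triangles_ear_clipping_spec : Claim_equal_get_triangles_ear_clipping := by
  intro polygon _
  unfold Spec_get_triangles_ear_clipping get_triangles_ear_clipping get_triangles_ear_clipping_alt
  simpa using pvWhile_eq polygon.length polygon [] rfl
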